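-- pv_equiv track=rewrite | github.com/nikhilakjoshi/reg-interpret-server | ai/agents/rule_synthesizer.py | _estimate_implementation_phases
-- ===== SOURCE A (Python) =====
-- from typing import Dict, Any, List
--
-- def _estimate_implementation_phases(
--     rules: List[Dict[str, Any]]
-- ) -> Dict[str, int]:
--     """Estimate implementation phases based on rule priorities."""
--
--     phases = {
--         "phase_1_immediate": 0,  # P1 rules
--         "phase_2_short_term": 0,  # P2 rules
--         "phase_3_medium_term": 0,  # P3 rules
--         "phase_4_long_term": 0,  # P4 rules
--     }
--
--     for rule in rules:
--         priority = rule.get("implementation_priority", "p4")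
--         if priority == "p1":
--             phases["phase_1_immediate"] += 1
--         elif priority == "p2":
--             phases["phase_2_short_term"] += 1
--         elif priority == "p3":
--             phases["phase_3_medium_term"] += 1
--         else:
--             phases["phase_4_long_term"] += 1
--
--     return phases
-- ===== SOURCE B (Python) =====
-- from typing import Dict, Any, List
--
-- def _estimate_implementation_phases(
--     rules: List[Dict[str, Any]]
-- ) -> Dict[str, int]:
--     """Estimate implementation phases based on rule priorities."""
--     prios = [rule.get("implementation_priority", "p4") for rule in rules]
--     p1 = prios.count("p1")
--     p2 = prios.count("p2")
--     p3 = prios.count("p3")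
--     return {
--         "phase_1_immediate": p1,
--         "phase_2_short_term": p2,
--         "phase_3_medium_term": p3,
--         "phase_4_long_term": len(prios) - p1 - p2 - p3,
--     }
-- ===== Notes on version B (the rewrite author's own statement) =====
-- stated objective: simpler
-- what changed: Replaces the mutable four-bucket dict updated in a branch chain by extracting the priority list once and counting p1/p2/p3 with list.count, with phase_4 as total minus the other three.
import Mathlib
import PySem

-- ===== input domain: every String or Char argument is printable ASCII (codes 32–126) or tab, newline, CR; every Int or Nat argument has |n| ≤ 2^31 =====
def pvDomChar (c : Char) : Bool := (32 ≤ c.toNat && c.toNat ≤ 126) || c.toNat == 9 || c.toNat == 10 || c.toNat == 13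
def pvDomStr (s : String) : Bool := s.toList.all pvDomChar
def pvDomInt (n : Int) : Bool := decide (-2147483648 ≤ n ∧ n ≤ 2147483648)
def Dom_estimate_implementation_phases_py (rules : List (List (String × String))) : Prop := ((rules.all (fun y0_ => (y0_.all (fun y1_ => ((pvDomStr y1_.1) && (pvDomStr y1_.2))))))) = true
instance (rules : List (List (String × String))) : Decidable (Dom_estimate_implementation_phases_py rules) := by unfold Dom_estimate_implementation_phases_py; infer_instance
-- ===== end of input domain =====

-- B is simpler: it extracts the priority list once and counts p1/p2/p3 with list.count,
-- computing phase_4 as total minus the other three, instead of A's mutable dict + branch chain.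

-- ===== PORT A =====
-- literal transliteration: a four-key dict, one pass with an if/elif chain incrementing a bucket
-- the loop body of A, named for clarity: one rule updates one bucket
def phaseStep (d : PySem.Dict String Int) (rule : List (String × String)) : PySem.Dict String Int :=
  let priority := (PySem.Dict.mk rule).getD "implementation_priority" "p4"
  if priority == "p1" then d.modify "phase_1_immediate" 0 (· + 1)
  else if priority == "p2" then d.modify "phase_2_short_term" 0 (· + 1)
  else if priority == "p3" then d.modify "phase_3_medium_term" 0 (· + 1)
  else d.modify "phase_4_long_term" 0 (· + 1)

def estimate_implementation_phases_py (rules : List (List (String × String))) : List (String × Int) :=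
  let phases : PySem.Dict String Int :=
    PySem.Dict.mk [("phase_1_immediate", 0), ("phase_2_short_term", 0),
                   ("phase_3_medium_term", 0), ("phase_4_long_term", 0)]
  let phases := rules.foldl phaseStep phases
  phases.items

-- ===== PORT B =====
def estimate_implementation_phases_py_alt (rules : List (List (String × String))) : List (String × Int) :=
  let prios := rules.map (fun rule => (PySem.Dict.mk rule).getD "implementation_priority" "p4")
  let p1 : Int := prios.count "p1"
  let p2 : Int := prios.count "p2"
  let p3 : Int := prios.count "p3"
  [("phase_1_immediate", p1), ("phase_2_short_term", p2),
   ("phase_3_medium_term", p3), ("phase_4_long_term", (prios.length : Int) - p1 - p2 - p3)]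

-- ===== PRECONDITION & SPEC =====
def Spec_estimate_implementation_phases_py (rules : List (List (String × String))) (out : List (String × Int)) : Prop := out = estimate_implementation_phases_py_alt rules
instance (rules : List (List (String × String))) (out : List (String × Int)) : Decidable (Spec_estimate_implementation_phases_py rules out) := by unfold Spec_estimate_implementation_phases_py; infer_instance

-- ===== CLAIM (what is proved, stated in full; the proofs are below) =====
def Claim_equal_estimate_implementation_phases_py : Prop := ∀ (rules : List (List (String × String))), Dom_estimate_implementation_phases_py rules → Spec_estimate_implementation_phases_py rules (estimate_implementation_phases_py rules)

-- ===== LEMMAS AND PROOFS =====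

-- invariant of A's loop: starting from arbitrary bucket values, the items are those values
-- plus the per-priority counts over the extracted priority list
lemma phases_loop_invariant (rules : List (List (String × String))) :
    ∀ (a b c e : Int),
      ((rules.foldl phaseStep
        (PySem.Dict.mk [("phase_1_immediate", a), ("phase_2_short_term", b),
                        ("phase_3_medium_term", c), ("phase_4_long_term", e)])).items) =
      (let prios := rules.map (fun rule => (PySem.Dict.mk rule).getD "implementation_priority" "p4")
       [("phase_1_immediate", a + prios.count "p1"),
        ("phase_2_short_term", b + prios.count "p2"),
        ("phase_3_medium_term", c + prios.count "p3"),
        ("phase_4_long_term",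
          e + ((prios.length : Int) - prios.count "p1" - prios.count "p2" - prios.count "p3"))]) := by
  induction rules with
  | nil => intro a b c e; simp
  | cons rule rs ih =>
    intro a b c e
    simp only [List.foldl_cons, List.map_cons]
    set p := (PySem.Dict.mk rule).getD "implementation_priority" "p4" with hp
    by_cases h1 : p = "p1"
    · have hstep : phaseStep (PySem.Dict.mk [("phase_1_immediate", a), ("phase_2_short_term", b),
          ("phase_3_medium_term", c), ("phase_4_long_term", e)]) rule =
          PySem.Dict.mk [("phase_1_immediate", a + 1), ("phase_2_short_term", b),
          ("phase_3_medium_term", c), ("phase_4_long_term", e)] := by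
        simp only [phaseStep]
        rw [← hp]
        simp [h1, PySem.Dict.modify, PySem.Dict.insert, PySem.Dict.getD,
              PySem.Dict.get?, PySem.Dict.contains]
      rw [hstep, ih]
      simp [h1]
      all_goals (push_cast; omega)
    · by_cases h2 : p = "p2"
      · have hstep : phaseStep (PySem.Dict.mk [("phase_1_immediate", a), ("phase_2_short_term", b),
            ("phase_3_medium_term", c), ("phase_4_long_term", e)]) rule =
            PySem.Dict.mk [("phase_1_immediate", a), ("phase_2_short_term", b + 1),
            ("phase_3_medium_term", c), ("phase_4_long_term", e)] := by
          simp only [phaseStep]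
          rw [← hp]
          simp [h2, PySem.Dict.modify, PySem.Dict.insert, PySem.Dict.getD,
                PySem.Dict.get?, PySem.Dict.contains]
        rw [hstep, ih]
        simp [h2]
        all_goals (push_cast; omega)
      · by_cases h3 : p = "p3"
        · have hstep : phaseStep (PySem.Dict.mk [("phase_1_immediate", a), ("phase_2_short_term", b),
              ("phase_3_medium_term", c), ("phase_4_long_term", e)]) rule =
              PySem.Dict.mk [("phase_1_immediate", a), ("phase_2_short_term", b),
              ("phase_3_medium_term", c + 1), ("phase_4_long_term", e)] := by
            simp only [phaseStep]
            rw [← hp]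
            simp [h3, PySem.Dict.modify, PySem.Dict.insert, PySem.Dict.getD,
                  PySem.Dict.get?, PySem.Dict.contains]
          rw [hstep, ih]
          simp [h3]
          all_goals (push_cast; omega)
        · have hstep : phaseStep (PySem.Dict.mk [("phase_1_immediate", a), ("phase_2_short_term", b),
              ("phase_3_medium_term", c), ("phase_4_long_term", e)]) rule =
              PySem.Dict.mk [("phase_1_immediate", a), ("phase_2_short_term", b),
              ("phase_3_medium_term", c), ("phase_4_long_term", e + 1)] := by
            simp only [phaseStep]
            rw [← hp]
            simp [h1, h2, h3, PySem.Dict.modify, PySem.Dict.insert, PySem.Dict.getD,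
                  PySem.Dict.get?, PySem.Dict.contains]
          rw [hstep, ih]
          simp [h1, h2, h3]
          all_goals (push_cast; omega)

-- ===== VERDICT (by name: the statement is the Claim_ definition above) =====
theorem estimate_implementation_phases_py_spec : Claim_equal_estimate_implementation_phases_py := by
  intro rules _
  unfold Spec_estimate_implementation_phases_py estimate_implementation_phases_py estimate_implementation_phases_py_alt
  simpa using phases_loop_invariant rules 0 0 0 0
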